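-- pv_equiv track=rewrite | github.com/Sudhansan5/InterviewBit-Solution-Python | Graph Modified/Graph I/play school.py | Solve
-- ===== SOURCE A (Python) =====
-- def Solve(A):
--     m = len(A)
--     n = len(A[0])
--     vis = [[False] * n for _ in range(m)]
--     q = []
--     for i in range(m):
--         for j in range(n):
--             if A[i][j] == 'p':
--                 q.append((i, j))
--     level = 0
--     while q:
--         i, j = q.pop(0)
--         vis[i][j] = True
--
--         row = [1, 0, -1, 0]
--         col = [0, 1, 0, -1]
--
--         for r, c in zip(row, col):
--             new_r = i + r
--             new_c = j + c
--
--             if new_r > m - 1 or new_r < 0 or new_c > n - 1 or new_c < 0: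
--                 continue
--
--             vis[new_r][new_c] = True
--             if A[new_r][new_c] == 'h':
--                 level += 1
--
--     return level
-- ===== SOURCE B (Python) =====
-- def Solve(A):
--     n = len(A[0])
--
--     def ph(x, y):
--         return (x == 'p' and y == 'h') or (x == 'h' and y == 'p')
--
--     horiz = sum(ph(x, y) for row in A for x, y in zip(row[:n], row[1:n]))
--     vert = sum(ph(x, y) for r1, r2 in zip(A, A[1:]) for x, y in zip(r1[:n], r2[:n]))
--     return horiz + vert
-- ===== Notes on version B (the rewrite author's own statement) =====
-- stated objective: alternative
-- what changed: B counts grid edges instead of cells: it zips each row with itself shifted and consecutive rows pairwise, counting each adjacent pair once with a symmetric one-p-one-h test, replacing A's queue of 'p' cells consumed with pop(0) and per-cell four-neighbour bound-checked lookups.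
import Mathlib
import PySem

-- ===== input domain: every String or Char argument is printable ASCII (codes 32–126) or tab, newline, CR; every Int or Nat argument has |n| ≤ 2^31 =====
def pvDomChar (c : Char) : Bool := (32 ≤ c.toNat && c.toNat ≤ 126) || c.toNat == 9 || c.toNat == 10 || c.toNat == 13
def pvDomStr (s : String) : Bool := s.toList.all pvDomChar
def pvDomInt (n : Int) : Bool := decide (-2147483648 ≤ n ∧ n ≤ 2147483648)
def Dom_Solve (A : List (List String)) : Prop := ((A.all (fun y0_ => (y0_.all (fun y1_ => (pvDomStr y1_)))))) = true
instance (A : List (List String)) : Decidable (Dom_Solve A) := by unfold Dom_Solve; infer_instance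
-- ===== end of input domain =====

-- B counts each adjacent cell-pair (grid edge) once with a symmetric {p,h} test — two
-- zip passes over rows and over consecutive-row pairs — instead of A's queue of 'p'
-- cells consumed with pop(0) and per-cell 4-neighbour bound checks (objective: alternative).


-- ===== PORT A =====
-- vis[i][j] = True
def pvSet2 (vis : List (List Bool)) (i j : Nat) : List (List Bool) :=
  vis.set i ((vis.getD i []).set j true)

-- zip(row, col) of A
def pvDirs : List (Int × Int) := [(1, 0), (0, 1), (-1, 0), (0, -1)]

-- body of A's inner 'for r, c in zip(row, col)' loop; state = (vis, level)
def pvStepA (A : List (List String)) (m n i j : Nat)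
    (st : List (List Bool) × Int) (d : Int × Int) : List (List Bool) × Int :=
  if (i : Int) + d.1 > (m : Int) - 1 ∨ (i : Int) + d.1 < 0 ∨
     (j : Int) + d.2 > (n : Int) - 1 ∨ (j : Int) + d.2 < 0 then st
  else
    let vis := pvSet2 st.1 ((i : Int) + d.1).toNat ((j : Int) + d.2).toNat
    if (A.getD ((i : Int) + d.1).toNat []).getD ((j : Int) + d.2).toNat "" = "h" then (vis, st.2 + 1)
    else (vis, st.2)

-- A's 'while q:' loop (q only shrinks: pop(0) = structural recursion on the list)
def pvLoopA (A : List (List String)) (m n : Nat) :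
    List (Nat × Nat) → List (List Bool) → Int → Int
  | [], _, level => level
  | (i, j) :: q, vis, level =>
    let vis' := pvSet2 vis i j
    let st := pvDirs.foldl (pvStepA A m n i j) (vis', level)
    pvLoopA A m n q st.1 st.2

def Solve (A : List (List String)) : Int :=
  let m := A.length
  let n := (A.headD []).length
  let vis := List.replicate m (List.replicate n false)
  let q := (List.range m).foldl (fun q i =>
    (List.range n).foldl (fun q j =>
      if (A.getD i []).getD j "" = "p" then q ++ [(i, j)] else q) q)
    ([] : List (Nat × Nat))
  pvLoopA A m n q vis 0

-- ===== PORT B =====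
-- ph(x, y): the pair is one 'p' and one 'h'
def pvPH (x y : String) : Bool := ((x == "p") && (y == "h")) || ((x == "h") && (y == "p"))

-- sum(ph(x, y) for x, y in ps)  (Python sums booleans as 0/1)
def pvEdgeCount (ps : List (String × String)) : Int :=
  ps.foldl (fun t p => if pvPH p.1 p.2 then t + 1 else t) 0

def Solve_alt (A : List (List String)) : Int :=
  let n := (A.headD []).length
  -- horiz: for row in A, pairs zip(row[:n], row[1:n]); row[1:n] = (row[:n]).tail
  let horiz := (A.map (fun row => pvEdgeCount ((row.take n).zip ((row.take n).tail)))).sum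
  -- vert: for r1, r2 in zip(A, A[1:]), pairs zip(r1[:n], r2[:n])
  let vert := ((A.zip A.tail).map (fun rr => pvEdgeCount ((rr.1.take n).zip (rr.2.take n)))).sum
  horiz + vert

-- ===== PRECONDITION & SPEC =====
-- exactly where Python A returns: A[0] must exist and every row must reach column n-1
def Pre_Solve (A : List (List String)) : Prop :=
  A ≠ [] ∧ ∀ row ∈ A, (A.headD []).length ≤ row.length
instance (A : List (List String)) : Decidable (Pre_Solve A) := by
  unfold Pre_Solve; infer_instance

def pvWitness_Solve : List (List String) := [["p", "h"], ["h", "x"]]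

def Spec_Solve (A : List (List String)) (out : Int) : Prop := out = Solve_alt A
instance (A : List (List String)) (out : Int) : Decidable (Spec_Solve A out) := by
  unfold Spec_Solve; infer_instance

-- ===== CLAIM (what is proved, stated in full; the proofs are below) =====
def Claim_equal_Solve : Prop :=
  ∀ (A : List (List String)), Dom_Solve A → Pre_Solve A → Spec_Solve A (Solve A)

-- ===== LEMMAS AND PROOFS =====

-- grid lookup shorthand (proof-side only)
def pvG (A : List (List String)) (i j : Nat) : String := (A.getD i []).getD j ""

-- per-direction contribution of A's inner loop to 'level'
def pvW (A : List (List String)) (m n i j : Nat) (d : Int × Int) : Int :=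
  if (i : Int) + d.1 > (m : Int) - 1 ∨ (i : Int) + d.1 < 0 ∨
     (j : Int) + d.2 > (n : Int) - 1 ∨ (j : Int) + d.2 < 0 then 0
  else if (A.getD ((i : Int) + d.1).toNat []).getD ((j : Int) + d.2).toNat "" = "h" then 1 else 0

def pvCnt (A : List (List String)) (m n i j : Nat) : Int :=
  (pvDirs.map (pvW A m n i j)).sum

-- A's four neighbour checks, written with Nat indices
def pvCountB (A : List (List String)) (m n i j : Nat) : Int :=
  (if 0 < i ∧ pvG A (i - 1) j = "h" then 1 else 0) +
  (if i + 1 < m ∧ pvG A (i + 1) j = "h" then 1 else 0) +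
  (if 0 < j ∧ pvG A i (j - 1) = "h" then 1 else 0) +
  (if j + 1 < n ∧ pvG A i (j + 1) = "h" then 1 else 0)

theorem pvStepA_snd (A : List (List String)) (m n i j : Nat)
    (st : List (List Bool) × Int) (d : Int × Int) :
    (pvStepA A m n i j st d).2 = st.2 + pvW A m n i j d := by
  unfold pvStepA pvW
  split_ifs
  all_goals simp

theorem pvFoldl_stepA_snd (A : List (List String)) (m n i j : Nat) :
    ∀ (ds : List (Int × Int)) (st : List (List Bool) × Int),
      (ds.foldl (pvStepA A m n i j) st).2 = st.2 + (ds.map (pvW A m n i j)).sum := by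
  intro ds
  induction ds with
  | nil => intro st; simp
  | cons d ds ih =>
    intro st
    simp only [List.foldl_cons, List.map_cons, List.sum_cons, ih, pvStepA_snd]
    ring

theorem pvLoopA_eq (A : List (List String)) (m n : Nat) :
    ∀ (q : List (Nat × Nat)) (vis : List (List Bool)) (level : Int),
      pvLoopA A m n q vis level
        = level + (q.map (fun p => pvCnt A m n p.1 p.2)).sum := by
  intro q
  induction q with
  | nil => intro vis level; simp [pvLoopA]
  | cons p q ih =>
    intro vis level
    obtain ⟨i, j⟩ := p
    simp only [pvLoopA, ih, pvFoldl_stepA_snd, pvCnt, List.map_cons, List.sum_cons]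
    ring

-- the queue-building fold collects exactly the 'p' positions, row-major
theorem pvFoldl_app_if {α β : Type} (P : α → Prop) [DecidablePred P] (f : α → β) :
    ∀ (l : List α) (acc : List β),
      l.foldl (fun acc x => if P x then acc ++ [f x] else acc) acc
        = acc ++ l.flatMap (fun x => if P x then [f x] else []) := by
  intro l
  induction l with
  | nil => intro acc; simp
  | cons x l ih =>
    intro acc
    by_cases h : P x <;> simp [h, ih]

-- B's counting fold is a sum of 0/1 indicators
theorem pvEdgeCount_eq_sum :
    ∀ (ps : List (String × String)) (t : Int),
      ps.foldl (fun t p => if pvPH p.1 p.2 then t + 1 else t) t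
        = t + (ps.map (fun p => if pvPH p.1 p.2 then (1 : Int) else 0)).sum := by
  intro ps
  induction ps with
  | nil => intro t; simp
  | cons p ps ih =>
    intro t
    by_cases h : pvPH p.1 p.2
    · simp [h, ih]; ring
    · simp [h, ih]

-- pointwise: A's 4-direction count equals the Nat-indexed neighbour checks inside the grid
theorem pvCnt_eq_countB (A : List (List String)) (m n i j : Nat)
    (hi : i < m) (hj : j < n) :
    pvCnt A m n i j = pvCountB A m n i j := by
  have h1 : ((i : Int) + 1).toNat = i + 1 := by omega
  have h2 : ((j : Int) + 1).toNat = j + 1 := by omega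
  unfold pvCnt pvDirs pvCountB pvW pvG
  simp only [List.map_cons, List.map_nil, List.sum_cons, List.sum_nil]
  have e1 : (if (i : Int) + 1 > (m : Int) - 1 ∨ (i : Int) + 1 < 0 ∨ (j : Int) + 0 > (n : Int) - 1 ∨ (j : Int) + 0 < 0 then (0 : Int)
      else if (A.getD ((i : Int) + 1).toNat []).getD ((j : Int) + 0).toNat "" = "h" then 1 else 0)
      = (if i + 1 < m ∧ (A.getD (i + 1) []).getD j "" = "h" then 1 else 0) := by
    by_cases hb : i + 1 < m
    · have : ¬ ((i : Int) + 1 > (m : Int) - 1 ∨ (i : Int) + 1 < 0 ∨ (j : Int) + 0 > (n : Int) - 1 ∨ (j : Int) + 0 < 0) := by omega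
      simp [h1, hb]
      intro hcase; exfalso; omega
    · have : (i : Int) + 1 > (m : Int) - 1 := by omega
      simp [this, hb]
  have e2 : (if (i : Int) + 0 > (m : Int) - 1 ∨ (i : Int) + 0 < 0 ∨ (j : Int) + 1 > (n : Int) - 1 ∨ (j : Int) + 1 < 0 then (0 : Int)
      else if (A.getD ((i : Int) + 0).toNat []).getD ((j : Int) + 1).toNat "" = "h" then 1 else 0)
      = (if j + 1 < n ∧ (A.getD i []).getD (j + 1) "" = "h" then 1 else 0) := by
    by_cases hb : j + 1 < n
    · have : ¬ ((i : Int) + 0 > (m : Int) - 1 ∨ (i : Int) + 0 < 0 ∨ (j : Int) + 1 > (n : Int) - 1 ∨ (j : Int) + 1 < 0) := by omega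
      simp [h2, hb]
      intro hcase; exfalso; omega
    · have : (j : Int) + 1 > (n : Int) - 1 := by omega
      simp [this, hb]
  have e3 : (if (i : Int) + (-1) > (m : Int) - 1 ∨ (i : Int) + (-1) < 0 ∨ (j : Int) + 0 > (n : Int) - 1 ∨ (j : Int) + 0 < 0 then (0 : Int)
      else if (A.getD ((i : Int) + (-1)).toNat []).getD ((j : Int) + 0).toNat "" = "h" then 1 else 0)
      = (if 0 < i ∧ (A.getD (i - 1) []).getD j "" = "h" then 1 else 0) := by
    by_cases hb : 0 < i
    · have hc : ¬ ((i : Int) + (-1) > (m : Int) - 1 ∨ (i : Int) + (-1) < 0 ∨ (j : Int) + 0 > (n : Int) - 1 ∨ (j : Int) + 0 < 0) := by omega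
      have h3 : ((i : Int) + (-1)).toNat = i - 1 := by omega
      simp [h3, hb]
      intro hcase; exfalso; omega
    · have : (i : Int) + (-1) < 0 := by omega
      simp [this, hb]
  have e4 : (if (i : Int) + 0 > (m : Int) - 1 ∨ (i : Int) + 0 < 0 ∨ (j : Int) + (-1) > (n : Int) - 1 ∨ (j : Int) + (-1) < 0 then (0 : Int)
      else if (A.getD ((i : Int) + 0).toNat []).getD ((j : Int) + (-1)).toNat "" = "h" then 1 else 0)
      = (if 0 < j ∧ (A.getD i []).getD (j - 1) "" = "h" then 1 else 0) := by
    by_cases hb : 0 < j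
    · have hc : ¬ ((i : Int) + 0 > (m : Int) - 1 ∨ (i : Int) + 0 < 0 ∨ (j : Int) + (-1) > (n : Int) - 1 ∨ (j : Int) + (-1) < 0) := by omega
      have h3 : ((j : Int) + (-1)).toNat = j - 1 := by omega
      simp [h3, hb]
      intro hcase; exfalso; omega
    · have : (j : Int) + (-1) < 0 := by omega
      simp [this, hb]
  rw [e1, e2, e3, e4]
  ring

theorem pvSum_map_flatMap {α β : Type} (f : α → List β) (c : β → Int) :
    ∀ (l : List α), ((l.flatMap f).map c).sum = (l.map (fun x => ((f x).map c).sum)).sum := by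
  intro l
  induction l with
  | nil => simp
  | cons x l ih => simp [List.flatMap_cons, List.map_append, List.sum_append, ih]

-- indexing a list by range recovers the list
theorem pvMap_getD_range {α : Type} (d : α) :
    ∀ (l : List α), (List.range l.length).map (fun i => l.getD i d) = l := by
  intro l
  induction l with
  | nil => simp
  | cons x xs ih =>
    simp only [List.length_cons, List.range_succ_eq_map, List.map_cons, List.map_map]
    simp only [List.getD_cons_zero, Function.comp_def, List.getD_cons_succ]
    rw [ih]

-- a zip written out by indices
theorem pvZip_eq_range {α β : Type} (d : α) (e : β) :
    ∀ (l1 : List α) (l2 : List β),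
      l1.zip l2 = (List.range (min l1.length l2.length)).map
        (fun j => (l1.getD j d, l2.getD j e)) := by
  intro l1
  induction l1 with
  | nil => intro l2; simp
  | cons x xs ih =>
    intro l2
    cases l2 with
    | nil => simp
    | cons y ys =>
      simp only [List.zip_cons_cons, List.length_cons]
      rw [ih ys]
      have : min (xs.length + 1) (ys.length + 1) = min xs.length ys.length + 1 := by omega
      rw [this, List.range_succ_eq_map, List.map_cons, List.map_map]
      simp [Function.comp_def]

theorem pvGetD_take {α : Type} (d : α) (l : List α) (n j : Nat) :
    (l.take n).getD j d = if j < n then l.getD j d else d := by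
  simp only [List.getD, List.getElem?_take]
  split <;> simp

theorem pvGetD_tail {α : Type} (d : α) (l : List α) (j : Nat) :
    l.tail.getD j d = l.getD (j + 1) d := by
  simp [List.getD, List.getElem?_tail]

-- one line of the grid: A's right+left ordered (p,h) counts = B's symmetric edge count
theorem pvLineShift (f : Nat → String) (n : Nat) :
    (∑ j ∈ Finset.range n,
        ((if f j = "p" ∧ j + 1 < n ∧ f (j + 1) = "h" then (1 : Int) else 0) +
         (if f j = "p" ∧ 0 < j ∧ f (j - 1) = "h" then 1 else 0)))
      = ∑ j ∈ Finset.range (n - 1), (if pvPH (f j) (f (j + 1)) then (1 : Int) else 0) := by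
  cases n with
  | zero => simp
  | succ k =>
    rw [Finset.sum_add_distrib]
    have hT1 : (∑ j ∈ Finset.range (k + 1),
        (if f j = "p" ∧ j + 1 < k + 1 ∧ f (j + 1) = "h" then (1 : Int) else 0))
        = ∑ j ∈ Finset.range k, (if f j = "p" ∧ f (j + 1) = "h" then (1 : Int) else 0) := by
      rw [Finset.sum_range_succ]
      have : (if f k = "p" ∧ k + 1 < k + 1 ∧ f (k + 1) = "h" then (1 : Int) else 0) = 0 := by
        simp
      rw [this, add_zero]
      refine Finset.sum_congr rfl ?_
      intro j hj
      have hjk : j < k := Finset.mem_range.mp hj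
      have : j + 1 < k + 1 := by omega
      simp [this]
    have hT2 : (∑ j ∈ Finset.range (k + 1),
        (if f j = "p" ∧ 0 < j ∧ f (j - 1) = "h" then (1 : Int) else 0))
        = ∑ j ∈ Finset.range k, (if f (j + 1) = "p" ∧ f j = "h" then (1 : Int) else 0) := by
      rw [Finset.sum_range_succ']
      have h0 : (if f 0 = "p" ∧ 0 < 0 ∧ f (0 - 1) = "h" then (1 : Int) else 0) = 0 := by simp
      rw [h0, add_zero]
      refine Finset.sum_congr rfl ?_
      intro j hj
      simp
    rw [hT1, hT2, ← Finset.sum_add_distrib]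
    have hk : k + 1 - 1 = k := by omega
    rw [hk]
    refine Finset.sum_congr rfl ?_
    intro j hj
    by_cases h1 : f j = "p" <;> by_cases h2 : f (j + 1) = "h" <;>
      by_cases h3 : f j = "h" <;> by_cases h4 : f (j + 1) = "p" <;>
      simp_all [pvPH]

-- per-cell split: the 'if p then 4 direction checks' term as a sum of four indicators
theorem pvCell_split (A : List (List String)) (m n i j : Nat) :
    (if pvG A i j = "p" then pvCountB A m n i j else 0)
      = ((if pvG A i j = "p" ∧ j + 1 < n ∧ pvG A i (j + 1) = "h" then (1 : Int) else 0) +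
         (if pvG A i j = "p" ∧ 0 < j ∧ pvG A i (j - 1) = "h" then 1 else 0)) +
        ((if pvG A i j = "p" ∧ i + 1 < m ∧ pvG A (i + 1) j = "h" then (1 : Int) else 0) +
         (if pvG A i j = "p" ∧ 0 < i ∧ pvG A (i - 1) j = "h" then 1 else 0)) := by
  by_cases hp : pvG A i j = "p"
  · simp only [hp, if_pos, true_and]
    unfold pvCountB
    ring
  · simp [hp]

-- list-of-range sum as a Finset sum (definitional)
theorem pvSum_range (f : Nat → Int) (k : Nat) :
    ((List.range k).map f).sum = ∑ j ∈ Finset.range k, f j := rfl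

-- summing a mapped list by indices
theorem pvMapSum {α : Type} (d : α) (l : List α) (f : α → Int) :
    (l.map f).sum = ∑ i ∈ Finset.range l.length, f (l.getD i d) := by
  conv_lhs => rw [← pvMap_getD_range d l]
  rw [List.map_map, pvSum_range]
  rfl

-- ===== VERDICT (by name: the statement is the Claim_ definition above) =====
theorem Solve_spec : Claim_equal_Solve := by
  intro A _ hpre
  obtain ⟨hne, hrows⟩ := hpre
  unfold Spec_Solve Solve Solve_alt
  set m := A.length with hm
  set n := (A.headD []).length with hn
  have hrow : ∀ i, i < m → n ≤ (A.getD i []).length := by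
    intro i hi
    have h1 : A.getD i [] = A[i] := List.getD_eq_getElem A [] hi
    rw [h1]; exact hrows _ (List.getElem_mem hi)
  rw [pvLoopA_eq]
  have hq : (List.range m).foldl (fun q i =>
      (List.range n).foldl (fun q j =>
        if (A.getD i []).getD j "" = "p" then q ++ [(i, j)] else q) q)
      ([] : List (Nat × Nat))
      = (List.range m).flatMap (fun i =>
          (List.range n).flatMap (fun j =>
            if (A.getD i []).getD j "" = "p" then [(i, j)] else [])) := by
    have hinner : ∀ (i : Nat) (q : List (Nat × Nat)),
        (List.range n).foldl (fun q j =>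
          if (A.getD i []).getD j "" = "p" then q ++ [(i, j)] else q) q
          = q ++ (List.range n).flatMap (fun j =>
              if (A.getD i []).getD j "" = "p" then [(i, j)] else []) := by
      intro i q
      exact pvFoldl_app_if (fun j => (A.getD i []).getD j "" = "p") (fun j => (i, j)) _ q
    have : ∀ (l : List Nat) (q : List (Nat × Nat)),
        l.foldl (fun q i =>
          (List.range n).foldl (fun q j =>
            if (A.getD i []).getD j "" = "p" then q ++ [(i, j)] else q) q) q
          = q ++ l.flatMap (fun i =>
              (List.range n).flatMap (fun j =>
                if (A.getD i []).getD j "" = "p" then [(i, j)] else [])) := by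
      intro l
      induction l with
      | nil => intro q; simp
      | cons x l ih =>
        intro q
        rw [List.foldl_cons, hinner x q, ih, List.flatMap_cons, List.append_assoc]
    simpa using this (List.range m) []
  rw [hq, zero_add]
  -- A's value as a double Finset sum of per-cell indicators
  have hA : (((List.range m).flatMap (fun i =>
        (List.range n).flatMap (fun j =>
          if (A.getD i []).getD j "" = "p" then [(i, j)] else []))).map
        (fun p => pvCnt A m n p.1 p.2)).sum
      = ∑ i ∈ Finset.range m, ∑ j ∈ Finset.range n,
          (if pvG A i j = "p" then pvCountB A m n i j else 0) := by
    rw [pvSum_map_flatMap, pvSum_range]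
    refine Finset.sum_congr rfl ?_
    intro i hi
    rw [pvSum_map_flatMap, pvSum_range]
    refine Finset.sum_congr rfl ?_
    intro j hj
    have hi' : i < m := Finset.mem_range.mp hi
    have hj' : j < n := Finset.mem_range.mp hj
    by_cases hp : pvG A i j = "p"
    · rw [if_pos (show (A.getD i []).getD j "" = "p" from hp), if_pos hp]
      simp [pvCnt_eq_countB A m n i j hi' hj']
    · rw [if_neg (show ¬ (A.getD i []).getD j "" = "p" from hp), if_neg hp]
      simp
  rw [hA]
  -- B's horizontal pass as a double Finset sum
  have hB1 : (A.map (fun row => pvEdgeCount ((row.take n).zip ((row.take n).tail)))).sum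
      = ∑ i ∈ Finset.range m, ∑ j ∈ Finset.range (n - 1),
          (if pvPH (pvG A i j) (pvG A i (j + 1)) then (1 : Int) else 0) := by
    rw [pvMapSum ([] : List String)]
    refine Finset.sum_congr rfl ?_
    intro i hi
    have hi' : i < m := Finset.mem_range.mp hi
    have hlen : n ≤ (A.getD i []).length := hrow i hi'
    have htake : ((A.getD i []).take n).length = n := by
      rw [List.length_take]; omega
    have htail : (((A.getD i []).take n).tail).length = n - 1 := by
      rw [List.length_tail, htake]
    unfold pvEdgeCount
    rw [pvZip_eq_range "" "", pvEdgeCount_eq_sum, zero_add, List.map_map]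
    have hmin : min ((A.getD i []).take n).length (((A.getD i []).take n).tail).length = n - 1 := by
      rw [htake, htail]; omega
    rw [hmin, pvSum_range]
    refine Finset.sum_congr rfl ?_
    intro j hj
    have hj' : j < n - 1 := Finset.mem_range.mp hj
    simp only [Function.comp_def, pvGetD_tail, pvGetD_take]
    rw [if_pos (show j < n by omega), if_pos (show j + 1 < n by omega)]
    rfl
  -- B's vertical pass as a double Finset sum
  have hB2 : ((A.zip A.tail).map (fun rr => pvEdgeCount ((rr.1.take n).zip (rr.2.take n)))).sum
      = ∑ i ∈ Finset.range (m - 1), ∑ j ∈ Finset.range n,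
          (if pvPH (pvG A i j) (pvG A (i + 1) j) then (1 : Int) else 0) := by
    rw [pvZip_eq_range ([] : List String) ([] : List String), List.map_map]
    have hmin : min A.length A.tail.length = m - 1 := by
      rw [List.length_tail]; omega
    rw [hmin, pvSum_range]
    refine Finset.sum_congr rfl ?_
    intro i hi
    have hi' : i < m - 1 := Finset.mem_range.mp hi
    have hlen1 : n ≤ (A.getD i []).length := hrow i (by omega)
    have hlen2 : n ≤ (A.getD (i + 1) []).length := hrow (i + 1) (by omega)
    simp only [Function.comp_def, pvGetD_tail]
    have ht1 : ((A.getD i []).take n).length = n := by rw [List.length_take]; omega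
    have ht2 : ((A.getD (i + 1) []).take n).length = n := by rw [List.length_take]; omega
    unfold pvEdgeCount
    rw [pvZip_eq_range "" "", pvEdgeCount_eq_sum, zero_add, List.map_map]
    have hmin2 : min ((A.getD i []).take n).length (((A.getD (i + 1) []).take n)).length = n := by
      rw [ht1, ht2]; omega
    rw [hmin2, pvSum_range]
    refine Finset.sum_congr rfl ?_
    intro j hj
    have hj' : j < n := Finset.mem_range.mp hj
    simp only [Function.comp_def, pvGetD_take]
    rw [if_pos hj', if_pos hj']
    rfl
  simp only [hB1, hB2]
  -- per-cell split, then reassemble the two edge sums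
  have hsplit : (∑ i ∈ Finset.range m, ∑ j ∈ Finset.range n,
        (if pvG A i j = "p" then pvCountB A m n i j else 0))
      = (∑ i ∈ Finset.range m, ∑ j ∈ Finset.range n,
          ((if pvG A i j = "p" ∧ j + 1 < n ∧ pvG A i (j + 1) = "h" then (1 : Int) else 0) +
           (if pvG A i j = "p" ∧ 0 < j ∧ pvG A i (j - 1) = "h" then 1 else 0)))
        + (∑ i ∈ Finset.range m, ∑ j ∈ Finset.range n,
          ((if pvG A i j = "p" ∧ i + 1 < m ∧ pvG A (i + 1) j = "h" then (1 : Int) else 0) +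
           (if pvG A i j = "p" ∧ 0 < i ∧ pvG A (i - 1) j = "h" then 1 else 0))) := by
    rw [← Finset.sum_add_distrib]
    refine Finset.sum_congr rfl ?_
    intro i _
    rw [← Finset.sum_add_distrib]
    refine Finset.sum_congr rfl ?_
    intro j _
    exact pvCell_split A m n i j
  rw [hsplit]
  congr 1
  · refine Finset.sum_congr rfl ?_
    intro i _
    exact pvLineShift (fun j => pvG A i j) n
  · rw [Finset.sum_comm]
    have : ∀ j ∈ Finset.range n,
        (∑ i ∈ Finset.range m,
          ((if pvG A i j = "p" ∧ i + 1 < m ∧ pvG A (i + 1) j = "h" then (1 : Int) else 0) +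
           (if pvG A i j = "p" ∧ 0 < i ∧ pvG A (i - 1) j = "h" then 1 else 0)))
        = ∑ i ∈ Finset.range (m - 1), (if pvPH (pvG A i j) (pvG A (i + 1) j) then (1 : Int) else 0) := by
      intro j _
      exact pvLineShift (fun i => pvG A i j) m
    rw [Finset.sum_congr rfl this, Finset.sum_comm]
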